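-- pv_equiv track=rewrite | github.com/jmmichaud/BioinfoTools | BruteMotifEnumeration.py | Neighbors
-- ===== SOURCE A (Python) =====
-- def HammingDistance(text1,text2):
--     """Inputs two equal length DNA strings. Outputs the hamming distance between
--     them as an integer.  Each mismatch is a score of 1.
--     """
--     hamming = 0
--     for i in range(len(text2)):
--         if text1[i] != text2[i]:
--             hamming += 1
--     return hamming
--
-- def Neighbors(pattern, d):
--     """Inputs a pattern as a text string and a number of allowed mismatches, d.
--     Outputs all permutations of the pattern than have no more than d mismatches
--     of original pattern as a list of strings.
--     """
--     if d == 0: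
--         return pattern
--     elif len(pattern)== 1:
--         return ['A', 'C', 'G', 'T']
--     code = ['A', 'C', 'G', 'T']
--     neighborhood = []
--     suffixneighbors = Neighbors(pattern[1:], d)
--     for suff in suffixneighbors: #for each suffix in suffix neighbors adds base if hamming distance is less  or equal to allowed mismatches
--         if HammingDistance(pattern[1:], suff) < d: #If suffix neighbor and suffix of pattern have hamming distance less than mismatches, replaces first base of pattern with each base and adds to  list.
--             for base in code:
--                 neighborhood.append(base + suff)
--         else: #If suffix neighbor and suffix of pattern have hamming distance more than d, appends each suffix neighbor to first base of pattern.
--             neighborhood.append(pattern[0] + suff)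
--
--     return neighborhood
-- ===== SOURCE B (Python) =====
-- def Neighbors(pattern, d):
--     """Iterative bottom-up rebuild of the neighborhood: track (string, distance)
--     pairs from the rightmost character leftwards instead of recursing and
--     recomputing Hamming distances."""
--     if d == 0:
--         return pattern
--     if len(pattern) == 1:
--         return ['A', 'C', 'G', 'T']
--     code = ['A', 'C', 'G', 'T']
--     last = pattern[-1]
--     pairs = [(b, 0 if b == last else 1) for b in code]
--     for ch in reversed(pattern[:-1]):
--         new_pairs = []
--         for s, dist in pairs:
--             if dist < d:
--                 for b in code:
--                     new_pairs.append((b + s, dist if b == ch else dist + 1))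
--             else:
--                 new_pairs.append((ch + s, dist))
--         pairs = new_pairs
--     return [s for s, _ in pairs]
-- ===== Notes on version B (the rewrite author's own statement) =====
-- stated objective: alternative
-- what changed: A's suffix recursion that recomputes HammingDistance(pattern[1:], suff) for every suffix neighbor is replaced by a single iterative right-to-left pass that carries each neighbor's Hamming distance alongside it in (string, distance) pairs, so no distance is ever recomputed.
-- outside the precondition, e.g. on Neighbors('AC', 0): A returns 'AC', B returns 'AC'
import Mathlib
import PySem

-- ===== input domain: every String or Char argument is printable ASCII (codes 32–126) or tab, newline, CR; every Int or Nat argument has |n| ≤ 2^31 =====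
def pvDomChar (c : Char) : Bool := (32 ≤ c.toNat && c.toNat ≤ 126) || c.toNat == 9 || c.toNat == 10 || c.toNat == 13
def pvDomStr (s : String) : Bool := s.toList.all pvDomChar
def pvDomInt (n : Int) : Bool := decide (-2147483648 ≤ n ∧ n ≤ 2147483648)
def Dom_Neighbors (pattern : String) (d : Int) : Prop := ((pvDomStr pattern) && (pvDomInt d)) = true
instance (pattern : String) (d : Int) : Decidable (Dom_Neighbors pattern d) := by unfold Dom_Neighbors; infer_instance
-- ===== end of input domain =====

-- B replaces A's recursion (which recomputes HammingDistance on every suffix) by one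
-- right-to-left bottom-up pass over (neighbor, distance) pairs; objective: alternative decomposition.

-- ===== PORT A =====
-- HammingDistance, over List Char (strings are handled as their character lists).
-- Python indexing text1[i]/text2[i] raises out of range; here getElem? is used — exact
-- on the equal-length arguments A ever passes to it.
def pvHamming (text1 text2 : List Char) : Int :=
  (List.range text2.length).foldl
    (fun hamming i => if text1[i]? ≠ text2[i]? then hamming + 1 else hamming) 0

-- A's recursion over the character list. On [] with d ≠ 0 the Python recurses forever
-- (RecursionError): outside Pre_, [] returned; on d == 0 A returns the raw string (not a
-- list): outside Pre_, represented as the singleton [pattern].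
def NeighborsCoreA (d : Int) (pattern : List Char) : List (List Char) :=
  if d == 0 then [pattern]
  else match pattern with
  | [] => []
  | [_] => [['A'], ['C'], ['G'], ['T']]
  | p0 :: rest =>
    (NeighborsCoreA d rest).foldl
      (fun neighborhood suff =>
        if pvHamming rest suff < d then
          neighborhood ++ [('A' :: suff), ('C' :: suff), ('G' :: suff), ('T' :: suff)]
        else neighborhood ++ [p0 :: suff]) []
termination_by pattern.length
decreasing_by simp

def Neighbors (pattern : String) (d : Int) : List String :=
  (NeighborsCoreA d pattern.toList).map (fun s => String.mk s)

-- ===== PORT B =====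
def pvCode : List Char := ['A', 'C', 'G', 'T']

def pvSeed (last : Char) : List (List Char × Int) :=
  pvCode.map (fun b => (([b] : List Char), if b == last then (0 : Int) else 1))

def pvStep (d : Int) (ch : Char) (pairs : List (List Char × Int)) : List (List Char × Int) :=
  pairs.foldl
    (fun new_pairs p =>
      if p.2 < d then
        new_pairs ++ pvCode.map (fun b => (b :: p.1, if b == ch then p.2 else p.2 + 1))
      else new_pairs ++ [(ch :: p.1, p.2)]) []

-- Python B raises IndexError on pattern[-1] when pattern = "" and d ≠ 0 (outside Pre_): [] here.
def Neighbors_alt (pattern : String) (d : Int) : List String :=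
  if d == 0 then [pattern]
  else if PySem.Str.len pattern == 1 then ["A", "C", "G", "T"]
  else match pattern.toList.reverse with
  | [] => []
  | last :: restRev =>
    ((restRev.foldl (fun pairs ch => pvStep d ch pairs) (pvSeed last)).map
      (fun p => String.mk p.1))

-- ===== PRECONDITION & SPEC =====
-- Pre_ excludes d == 0, where A returns the raw pattern string rather than a list of
-- strings (not a value of the declared type), and pattern == "", where A recurses
-- forever (RecursionError).
def Pre_Neighbors (pattern : String) (d : Int) : Prop := d ≠ 0 ∧ pattern ≠ ""
instance (pattern : String) (d : Int) : Decidable (Pre_Neighbors pattern d) := by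
  unfold Pre_Neighbors; infer_instance

def pvWitness_Neighbors : String × Int := ("AC", 1)

def Spec_Neighbors (pattern : String) (d : Int) (out : List String) : Prop := out = Neighbors_alt pattern d
instance (pattern : String) (d : Int) (out : List String) : Decidable (Spec_Neighbors pattern d out) := by unfold Spec_Neighbors; infer_instance

-- ===== CLAIM (what is proved, stated in full; the proofs are below) =====
def Claim_equal_Neighbors : Prop := ∀ (pattern : String) (d : Int), Dom_Neighbors pattern d → Pre_Neighbors pattern d → Spec_Neighbors pattern d (Neighbors pattern d)

-- ===== LEMMAS AND PROOFS =====

-- pull the initial accumulator out of an accumulate-by-addition fold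
theorem pv_foldl_shift {α : Type} (F : Int → α → Int)
    (hF : ∀ (x y : Int) (i : α), F (x + y) i = x + F y i) (l : List α) (a : Int) :
    l.foldl F a = a + l.foldl F 0 := by
  induction l generalizing a with
  | nil => simp
  | cons x xs ih =>
    simp only [List.foldl_cons]
    rw [ih, ih (F 0 x)]
    have h := hF a 0 x
    rw [add_zero] at h
    rw [h]
    ring

theorem pvHamming_cons (c b : Char) (t1 t2 : List Char) :
    pvHamming (c :: t1) (b :: t2) = (if c = b then 0 else 1) + pvHamming t1 t2 := by
  unfold pvHamming
  rw [List.length_cons, List.range_succ_eq_map, List.foldl_cons, List.foldl_map]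
  simp only [List.getElem?_cons_zero, List.getElem?_cons_succ, Nat.succ_eq_add_one]
  rw [pv_foldl_shift]
  · congr 1
    · by_cases h : c = b <;> simp [h]
  · intro x y i
    split_ifs <;> omega

theorem pvHamming_single (c b : Char) :
    pvHamming [c] [b] = if b == c then (0 : Int) else 1 := by
  rw [pvHamming_cons]
  have h0 : pvHamming [] [] = 0 := rfl
  rw [h0]
  by_cases h : b = c
  · subst h; simp
  · have h2 : ¬ c = b := fun hh => h hh.symm
    simp [h, h2]

theorem pv_inc_eq (b c : Char) (H : Int) :
    (if b == c then H else H + 1) = (if c = b then 0 else 1) + H := by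
  by_cases h : b = c
  · subst h; simp
  · have h2 : ¬ c = b := fun hh => h hh.symm
    simp [h, h2]; omega

-- B's step as a flatMap
theorem pvStep_eq_flatMap (d : Int) (ch : Char) (pairs : List (List Char × Int)) :
    pvStep d ch pairs
      = pairs.flatMap (fun p =>
          if p.2 < d then
            pvCode.map (fun b => (b :: p.1, if b == ch then p.2 else p.2 + 1))
          else [(ch :: p.1, p.2)]) := by
  unfold pvStep
  have h : (fun (new_pairs : List (List Char × Int)) (p : List Char × Int) =>
      if p.2 < d then
        new_pairs ++ pvCode.map (fun b => (b :: p.1, if b == ch then p.2 else p.2 + 1))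
      else new_pairs ++ [(ch :: p.1, p.2)])
      = fun new_pairs p => new_pairs ++
          (if p.2 < d then
            pvCode.map (fun b => (b :: p.1, if b == ch then p.2 else p.2 + 1))
          else [(ch :: p.1, p.2)]) := by
    funext np p; split_ifs <;> rfl
  rw [h, PySem.List.foldl_append_eq_flatMap]
  simp

-- A's loop body as a flatMap
theorem pvCoreA_cons (d : Int) (hd : d ≠ 0) (p0 r0 : Char) (rs : List Char) :
    NeighborsCoreA d (p0 :: r0 :: rs)
      = (NeighborsCoreA d (r0 :: rs)).flatMap (fun suff =>
          if pvHamming (r0 :: rs) suff < d then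
            [('A' :: suff), ('C' :: suff), ('G' :: suff), ('T' :: suff)]
          else [p0 :: suff]) := by
  have hd' : (d == 0) = false := by simpa using hd
  rw [NeighborsCoreA, hd']
  case x => simp
  simp only [Bool.false_eq_true, if_false]
  have h : (fun (neighborhood : List (List Char)) (suff : List Char) =>
      if pvHamming (r0 :: rs) suff < d then
        neighborhood ++ [('A' :: suff), ('C' :: suff), ('G' :: suff), ('T' :: suff)]
      else neighborhood ++ [p0 :: suff])
      = fun neighborhood suff => neighborhood ++
          (if pvHamming (r0 :: rs) suff < d then
            [('A' :: suff), ('C' :: suff), ('G' :: suff), ('T' :: suff)]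
          else [p0 :: suff]) := by
    funext nb suff; split_ifs <;> rfl
  rw [h, PySem.List.foldl_append_eq_flatMap]
  simp

-- recursive reading of B's right-to-left fold
def pvRunB (d : Int) : List Char → List (List Char × Int)
  | [] => []
  | [c] => pvSeed c
  | c :: c2 :: rs => pvStep d c (pvRunB d (c2 :: rs))

theorem pvRunB_rev (d : Int) :
    ∀ (l : List Char) (last : Char) (rr : List Char), l.reverse = last :: rr →
      rr.foldl (fun pairs ch => pvStep d ch pairs) (pvSeed last) = pvRunB d l := by
  intro l
  induction l with
  | nil => intro last rr h; simp at h
  | cons c rest ih =>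
    intro last rr h
    match rest, ih with
    | [], _ =>
      simp at h
      obtain ⟨h1, h2⟩ := h
      subst h1; subst h2
      rfl
    | r0 :: rs, ih =>
      have hrev : (r0 :: rs).reverse ≠ [] := by simp
      obtain ⟨last', rr', hr⟩ := List.exists_cons_of_ne_nil hrev
      have hthis : (c :: r0 :: rs).reverse = last' :: (rr' ++ [c]) := by
        simp only [List.reverse_cons, hr]; rfl
      rw [hthis] at h
      injection h with h1 h2
      subst h1; subst h2
      rw [List.foldl_append]
      simp only [List.foldl_cons, List.foldl_nil]
      rw [ih _ _ hr]
      rfl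

-- the invariant: B's pairs are exactly A's neighbors tagged with their Hamming distance
theorem pvRunB_eq (d : Int) (hd : d ≠ 0) :
    ∀ l : List Char, l ≠ [] →
      pvRunB d l = (NeighborsCoreA d l).map (fun s => (s, pvHamming l s)) := by
  intro l
  induction l with
  | nil => intro h; exact absurd rfl h
  | cons c rest ih =>
    intro _
    match rest, ih with
    | [], _ =>
      have hd' : (d == 0) = false := by simpa using hd
      rw [NeighborsCoreA, hd']
      simp only [Bool.false_eq_true, if_false]
      simp only [pvRunB, pvSeed, pvCode, List.map_cons, List.map_nil, pvHamming_single]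
    | r0 :: rs, ih =>
      have hne : (r0 :: rs) ≠ ([] : List Char) := by simp
      have hrec : pvRunB d (c :: r0 :: rs) = pvStep d c (pvRunB d (r0 :: rs)) := rfl
      rw [hrec, ih hne, pvStep_eq_flatMap, pvCoreA_cons d hd c r0 rs]
      rw [List.flatMap_map, List.map_flatMap]
      refine congrArg₂ _ ?_ rfl
      funext suff
      simp only []
      by_cases hc : pvHamming (r0 :: rs) suff < d
      · simp only [hc, if_true, List.map_cons, List.map_nil, pvCode]
        refine congrArg₂ _ ?_ (congrArg₂ _ ?_ (congrArg₂ _ ?_ (congrArg₂ _ ?_ rfl))) <;>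
        · refine congrArg _ ?_
          rw [pvHamming_cons, pv_inc_eq]
      · simp only [hc, if_false, List.map_cons, List.map_nil]
        rw [pvHamming_cons]
        simp

-- ===== VERDICT (by name: the statement is the Claim_ definition above) =====
theorem Neighbors_spec : Claim_equal_Neighbors := by
  intro pattern d _ hpre
  obtain ⟨hd, hne⟩ := hpre
  unfold Spec_Neighbors Neighbors Neighbors_alt
  have hd' : (d == 0) = false := by simpa using hd
  rw [hd']
  simp only [Bool.false_eq_true, if_false]
  have hlist : pattern.toList ≠ [] := fun h => hne (by simpa using h)
  by_cases hlen : (PySem.Str.len pattern == 1) = true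
  · rw [if_pos hlen]
    have hl : pattern.toList.length = 1 := by
      have h := hlen
      simp only [PySem.Str.len_eq, beq_iff_eq] at h
      exact_mod_cast h
    obtain ⟨c, hc⟩ := List.length_eq_one_iff.mp hl
    rw [hc, NeighborsCoreA, hd']
    simp only [Bool.false_eq_true, if_false]
    decide
  · rw [if_neg hlen]
    have hrevne : pattern.toList.reverse ≠ [] := by simpa using hlist
    obtain ⟨last, rr, hr⟩ := List.exists_cons_of_ne_nil hrevne
    rw [hr]
    show List.map (fun s => String.mk s) (NeighborsCoreA d pattern.toList)
      = (rr.foldl (fun pairs ch => pvStep d ch pairs) (pvSeed last)).map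
          (fun p => String.mk p.1)
    rw [pvRunB_rev d pattern.toList last rr hr, pvRunB_eq d hd pattern.toList hlist]
    simp [List.map_map, Function.comp]
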